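-- pv_equiv track=rewrite | github.com/TonyZherdeff/Website | utils.py | odd_list_create
-- ===== SOURCE A (Python) =====
-- def odd_list_create(num_start, num_end) -> str:
--     odd_list = []
--     i = num_start
--     while i <= num_end:
--         if i % 2:
--             odd_list.append(str(i))
--         i += 1
--     return " ".join(odd_list)
-- ===== SOURCE B (Python) =====
-- def odd_list_create(num_start, num_end) -> str:
--     first = num_start if num_start % 2 else num_start + 1
--     return " ".join(str(i) for i in range(first, num_end + 1, 2))
-- ===== Notes on version B (the rewrite author's own statement) =====
-- stated objective: simpler
-- what changed: Replaces the filter-every-integer while loop (modulo test on each i) with a closed-form first odd value and a single step-2 range joined directly, visiting only the odd numbers.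
import Mathlib
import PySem

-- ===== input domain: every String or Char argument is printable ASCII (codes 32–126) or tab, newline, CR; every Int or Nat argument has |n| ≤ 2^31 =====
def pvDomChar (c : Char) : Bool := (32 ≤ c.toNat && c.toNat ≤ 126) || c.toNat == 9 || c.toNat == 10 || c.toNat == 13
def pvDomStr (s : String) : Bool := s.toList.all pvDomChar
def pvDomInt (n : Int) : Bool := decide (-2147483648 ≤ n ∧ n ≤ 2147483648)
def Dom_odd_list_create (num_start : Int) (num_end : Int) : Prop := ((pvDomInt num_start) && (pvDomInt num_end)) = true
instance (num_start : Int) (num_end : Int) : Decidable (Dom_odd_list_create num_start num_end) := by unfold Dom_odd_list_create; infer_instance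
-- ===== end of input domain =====

-- B replaces A's filter-every-integer while loop by a closed-form first odd value and a
-- single step-2 range joined directly (objective: simpler).

-- ===== PORT A =====
-- the while loop of A: i runs from num_start up to num_end, appending str(i) when i % 2 is truthy
def oddListLoop (num_end : Int) (i : Int) : List String :=
  if _h : i ≤ num_end then
    (if PySem.Int.mod i 2 ≠ 0 then [PySem.Int.toStr i] else []) ++ oddListLoop num_end (i + 1)
  else []
termination_by (num_end + 1 - i).toNat
decreasing_by omega

def odd_list_create (num_start : Int) (num_end : Int) : String :=
  PySem.Str.join " " (oddListLoop num_end num_start)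

-- ===== PORT B =====
def odd_list_create_alt (num_start : Int) (num_end : Int) : String :=
  let first : Int := if PySem.Int.mod num_start 2 ≠ 0 then num_start else num_start + 1
  PySem.Str.join " " ((PySem.List.pyRange first (num_end + 1) 2).map PySem.Int.toStr)

-- ===== PRECONDITION & SPEC =====
def Spec_odd_list_create (num_start : Int) (num_end : Int) (out : String) : Prop := out = odd_list_create_alt num_start num_end
instance (num_start : Int) (num_end : Int) (out : String) : Decidable (Spec_odd_list_create num_start num_end out) := by unfold Spec_odd_list_create; infer_instance

-- ===== CLAIM (what is proved, stated in full; the proofs are below) =====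
def Claim_equal_odd_list_create : Prop := ∀ (num_start : Int) (num_end : Int), Dom_odd_list_create num_start num_end → Spec_odd_list_create num_start num_end (odd_list_create num_start num_end)

-- ===== LEMMAS AND PROOFS =====

-- a step-2 range unfolds one element at a time
theorem pyRange_two_cons (a b : Int) :
    PySem.List.pyRange a b 2 =
      if a < b then a :: PySem.List.pyRange (a + 2) b 2 else [] := by
  rw [PySem.List.pyRange_of_pos a b (by norm_num),
      PySem.List.pyRange_of_pos (a + 2) b (by norm_num)]
  by_cases h : a < b
  · simp only [h, if_true]
    have hn : ((b - a + 2 - 1) / 2).toNat =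
        (if a + 2 < b then ((b - (a + 2) + 2 - 1) / 2).toNat else 0) + 1 := by
      split_ifs with h2 <;> omega
    rw [hn, List.range_succ_eq_map]
    simp only [List.map_cons, List.map_map, Nat.cast_zero, mul_zero, add_zero]
    congr 1
    apply List.map_congr_left
    intro k _
    simp only [Function.comp_apply, Nat.cast_succ]
    ring
  · simp [h]

-- Python's i % 2 (on divisor 2) coincides with Lean's emod
theorem pymod_two (i : Int) : PySem.Int.mod i 2 = i % 2 := by
  simp [PySem.Int.mod, Int.fmod_eq_emod]

theorem oddListLoop_eq (num_end i : Int) :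
    oddListLoop num_end i =
      (PySem.List.pyRange (if PySem.Int.mod i 2 ≠ 0 then i else i + 1) (num_end + 1) 2).map
        PySem.Int.toStr := by
  generalize hn : (num_end + 1 - i).toNat = n
  induction n generalizing i with
  | zero =>
    rw [oddListLoop]
    have hle : ¬ i ≤ num_end := by omega
    rw [dif_neg hle, pyRange_two_cons]
    split_ifs <;> simp_all <;> omega
  | succ n ih =>
    rw [oddListLoop]
    have hle : i ≤ num_end := by omega
    rw [dif_pos hle, ih (i + 1) (by omega)]
    simp only [pymod_two]
    by_cases h1 : i % 2 = 0
    · -- i even: no token, the first odd number is i + 1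
      simp [h1, show (i + 1) % 2 ≠ 0 by omega]
    · -- i odd: emit str(i), the next odd number is i + 2
      simp only [h1, show ¬ ((i + 1) % 2 ≠ 0) by omega, if_false, ite_not,
                 show i + 1 + 1 = i + 2 by ring]
      rw [pyRange_two_cons i, if_pos (by omega)]
      simp

-- ===== VERDICT (by name: the statement is the Claim_ definition above) =====
theorem odd_list_create_spec : Claim_equal_odd_list_create := by
  intro num_start num_end _
  unfold Spec_odd_list_create odd_list_create odd_list_create_alt
  rw [oddListLoop_eq]
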